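-- pv_equiv track=rewrite | github.com/jaanerator/algorithm-practice | algorithm/programmers-kit/brute_1.py | solution
-- ===== SOURCE A (Python) =====
-- def solution(sizes):
--     size_min = []
--     size_max = []
--     for size in sizes:
--         size_min.append(min(size))
--         size_max.append(max(size))
--
--     answer = max(size_min) * max(size_max)
--     return answer
-- ===== SOURCE B (Python) =====
-- def solution(sizes):
--     def best(cards):
--         if len(cards) == 1:
--             s = cards[0]
--             return (min(s), max(s))
--         mid = len(cards) // 2
--         w1, h1 = best(cards[:mid])
--         w2, h2 = best(cards[mid:])
--         return (max(w1, w2), max(h1, h2))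
--     w, h = best(sizes)
--     return w * h
-- ===== Notes on version B (the rewrite author's own statement) =====
-- stated objective: alternative
-- what changed: Replaces A's two append-loops plus two separate max() reductions by a divide-and-conquer recursion that splits the card list in halves, returns each half's best (width, height) pair, and combines them componentwise with max.
import Mathlib
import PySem

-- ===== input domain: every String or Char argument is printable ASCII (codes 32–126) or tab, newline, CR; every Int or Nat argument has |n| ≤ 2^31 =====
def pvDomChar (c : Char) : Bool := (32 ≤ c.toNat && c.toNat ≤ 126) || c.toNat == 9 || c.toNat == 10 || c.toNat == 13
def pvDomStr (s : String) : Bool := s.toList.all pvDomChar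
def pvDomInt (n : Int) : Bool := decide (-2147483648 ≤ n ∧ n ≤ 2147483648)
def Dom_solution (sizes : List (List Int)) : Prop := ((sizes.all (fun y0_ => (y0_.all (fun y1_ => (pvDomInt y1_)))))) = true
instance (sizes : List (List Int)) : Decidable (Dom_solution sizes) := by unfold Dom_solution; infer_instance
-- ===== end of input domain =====

-- B replaces A's two append-loops plus two separate max() reductions by a divide-and-conquer
-- recursion on the card list, combining each half's best (width, height) pair componentwise
-- (objective: alternative).

-- ===== PORT A =====
-- min(size)/max(size) via PySem.List.min?/max?; `.getD 0` is unreachable inside Pre_ (inner lists nonempty)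
def solution (sizes : List (List Int)) : Int :=
  let size_min := sizes.foldl (fun acc size => acc ++ [((PySem.List.min? size (fun y => y)).getD 0)]) []
  let size_max := sizes.foldl (fun acc size => acc ++ [((PySem.List.max? size (fun y => y)).getD 0)]) []
  ((PySem.List.max? size_min (fun y => y)).getD 0) * ((PySem.List.max? size_max (fun y => y)).getD 0)

-- ===== PORT B =====
-- Source B's `best`: divide and conquer on the list of cards; cards[:mid]/cards[mid:] are take/drop
-- (nonnegative slice bounds). The fuel argument (initially sizes.length, which the recursion never
-- exhausts on nonempty input) and the `length ≤ 1` guard only make the recursion total; Source B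
-- diverges on [], which Pre_ excludes.
def solutionAltBest : Nat → List (List Int) → Int × Int
  | 0, _ => (0, 0)
  | fuel + 1, cards =>
    if cards.length ≤ 1 then
      let s := cards.headD []
      (((PySem.List.min? s (fun y => y)).getD 0), ((PySem.List.max? s (fun y => y)).getD 0))
    else
      let mid := cards.length / 2
      let p1 := solutionAltBest fuel (cards.take mid)
      let p2 := solutionAltBest fuel (cards.drop mid)
      (max p1.1 p2.1, max p1.2 p2.2)

def solution_alt (sizes : List (List Int)) : Int :=
  let p := solutionAltBest sizes.length sizes
  p.1 * p.2

-- ===== PRECONDITION & SPEC =====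
-- A raises ValueError when sizes is empty (max of []) or when some inner list is empty (min of []); those inputs are excluded.
def Pre_solution (sizes : List (List Int)) : Prop := sizes ≠ [] ∧ ∀ s ∈ sizes, s ≠ []
instance (sizes : List (List Int)) : Decidable (Pre_solution sizes) := by unfold Pre_solution; infer_instance
def pvWitness_solution : List (List Int) := [[3, 1], [5, 2]]
def Spec_solution (sizes : List (List Int)) (out : Int) : Prop := out = solution_alt sizes
instance (sizes : List (List Int)) (out : Int) : Decidable (Spec_solution sizes out) := by unfold Spec_solution; infer_instance

-- ===== CLAIM (what is proved, stated in full; the proofs are below) =====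
def Claim_equal_solution : Prop := ∀ (sizes : List (List Int)), Dom_solution sizes → Pre_solution sizes → Spec_solution sizes (solution sizes)

-- ===== LEMMAS AND PROOFS =====

def pvF (size : List Int) : Int := (PySem.List.min? size (fun y => y)).getD 0
def pvG (size : List Int) : Int := (PySem.List.max? size (fun y => y)).getD 0

-- running maximum of a nonempty list (0 on [], never used there)
def pvM : List Int → Int
  | [] => 0
  | x :: t => t.foldl max x

-- A's append-loop builds exactly the map
theorem pv_foldl_append (h : List Int → Int) (sizes : List (List Int)) (acc : List Int) :
    sizes.foldl (fun acc size => acc ++ [h size]) acc = acc ++ sizes.map h := by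
  induction sizes generalizing acc with
  | nil => simp
  | cons x t ih => simp [List.foldl, ih, List.append_assoc]

theorem pvM_append (l1 l2 : List Int) (h1 : l1 ≠ []) (h2 : l2 ≠ []) :
    pvM (l1 ++ l2) = max (pvM l1) (pvM l2) := by
  obtain ⟨x, t1, rfl⟩ := List.exists_cons_of_ne_nil h1
  obtain ⟨y, t2, rfl⟩ := List.exists_cons_of_ne_nil h2
  simp only [pvM, List.cons_append, List.foldl_append, List.foldl_cons]
  exact List.foldl_assoc

-- the divide-and-conquer helper computes the two running maxima
theorem pv_best_eq (fuel : Nat) : ∀ cards : List (List Int), cards.length ≤ fuel → cards ≠ [] →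
    solutionAltBest fuel cards = (pvM (cards.map pvF), pvM (cards.map pvG)) := by
  induction fuel with
  | zero => intro cards hl hne; cases cards <;> simp_all
  | succ n ih =>
    intro cards hl hne
    by_cases hone : cards.length ≤ 1
    · obtain ⟨x, t, rfl⟩ := List.exists_cons_of_ne_nil hne
      have : t = [] := by cases t <;> simp_all
      subst this
      simp [solutionAltBest, pvM, pvF, pvG]
    · rw [solutionAltBest]
      simp only [hone, if_false]
      have hlen : 2 ≤ cards.length := by omega
      have hmid1 : 1 ≤ cards.length / 2 := by omega
      have hmid2 : cards.length / 2 < cards.length := by omega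
      have htne : cards.take (cards.length / 2) ≠ [] := by
        simp [← List.length_pos_iff]; omega
      have hdne : cards.drop (cards.length / 2) ≠ [] := by
        simp [List.length_pos_iff.symm, List.length_drop]; omega
      rw [ih _ (by simp [List.length_take]; omega) htne,
          ih _ (by simp [List.length_drop]; omega) hdne]
      have hsplit : cards = cards.take (cards.length / 2) ++ cards.drop (cards.length / 2) :=
        (List.take_append_drop _ _).symm
      conv_rhs => rw [hsplit]
      rw [List.map_append, List.map_append,
          pvM_append _ _ (by simpa using htne) (by simpa using hdne),
          pvM_append _ _ (by simpa using htne) (by simpa using hdne)]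

-- ===== VERDICT (by name: the statement is the Claim_ definition above) =====
theorem solution_spec : Claim_equal_solution := by
  intro sizes _ hpre
  obtain ⟨hne, _⟩ := hpre
  unfold Spec_solution solution solution_alt
  rw [pv_best_eq sizes.length sizes le_rfl hne]
  obtain ⟨x, t, rfl⟩ := List.exists_cons_of_ne_nil hne
  show (PySem.List.max? ((x :: t).foldl (fun acc size => acc ++ [pvF size]) []) (fun y => y)).getD 0 *
       (PySem.List.max? ((x :: t).foldl (fun acc size => acc ++ [pvG size]) []) (fun y => y)).getD 0 = _
  rw [pv_foldl_append pvF, pv_foldl_append pvG]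
  simp only [List.nil_append, List.map_cons, PySem.List.max?_id_cons, Option.getD_some]
  rfl
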